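-- pv_equiv track=rewrite | github.com/KhairulIzwan/SVA | backend/grpc_server_fixed_new.py | _extract_themes_from_content
-- ===== SOURCE A (Python) =====
-- def _extract_themes_from_content(text):
--     """Extract themes dynamically based on content"""
--     themes = []
--
--     # Business/Success themes
--     if any(word in text for word in ['success', 'business', 'achievement', 'goal']):
--         if 'comfort zone' in text:
--             themes.append("Personal growth and stepping outside comfort zones")
--         if 'uncomfortable' in text:
--             themes.append("Embracing discomfort for success")
--         if 'fail' in text:
--             themes.append("Overcoming failure and setbacks")
--         themes.append("Success mindset and achievement strategies")
--
--     # Educational themes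
--     elif any(word in text for word in ['learn', 'study', 'education', 'knowledge']):
--         themes.append("Learning and knowledge acquisition")
--         themes.append("Educational content and skill development")
--
--     # Technology themes
--     elif any(word in text for word in ['technology', 'software', 'computer', 'digital']):
--         themes.append("Technology and digital innovation")
--         themes.append("Technical education and development")
--
--     # Health/Fitness themes
--     elif any(word in text for word in ['health', 'fitness', 'exercise', 'workout']):
--         themes.append("Health and wellness")
--         themes.append("Physical fitness and lifestyle")
--
--     # Entertainment themes
--     elif any(word in text for word in ['music', 'song', 'entertainment', 'fun']):
--         themes.append("Entertainment and leisure content")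
--         themes.append("Creative and artistic expression")
--
--     # News/Information themes
--     elif any(word in text for word in ['news', 'report', 'information', 'update']):
--         themes.append("News and current events")
--         themes.append("Information and updates")
--
--     # Conversational/Personal themes
--     elif any(word in text for word in ['thank', 'hello', 'welcome', 'goodbye']):
--         themes.append("Personal communication and interaction")
--         themes.append("Social content and engagement")
--
--     # Default general themes
--     if not themes:
--         if len(text) > 100:
--             themes.append("Extended discussion or presentation")
--         else:
--             themes.append("Brief communication or announcement")
--
--     return themes
-- ===== SOURCE B (Python) =====
-- # Different algorithm: one left-to-right sweep over all text positions collects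
-- # EVERY keyword hit as a priority tag; the theme category is then selected as the
-- # minimum tag (highest priority), instead of A's elif ladder of per-keyword
-- # substring tests with first-match short-circuiting.
--
-- KEYWORD_TAGS = [
--     ('success', 0), ('business', 0), ('achievement', 0), ('goal', 0),
--     ('learn', 1), ('study', 1), ('education', 1), ('knowledge', 1),
--     ('technology', 2), ('software', 2), ('computer', 2), ('digital', 2),
--     ('health', 3), ('fitness', 3), ('exercise', 3), ('workout', 3),
--     ('music', 4), ('song', 4), ('entertainment', 4), ('fun', 4),
--     ('news', 5), ('report', 5), ('information', 5), ('update', 5),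
--     ('thank', 6), ('hello', 6), ('welcome', 6), ('goodbye', 6),
--     ('comfort zone', 7), ('uncomfortable', 8), ('fail', 9),
-- ]
--
-- CATEGORY_THEMES = {
--     1: ["Learning and knowledge acquisition", "Educational content and skill development"],
--     2: ["Technology and digital innovation", "Technical education and development"],
--     3: ["Health and wellness", "Physical fitness and lifestyle"],
--     4: ["Entertainment and leisure content", "Creative and artistic expression"],
--     5: ["News and current events", "Information and updates"],
--     6: ["Personal communication and interaction", "Social content and engagement"],
-- }
--
-- EXTRA_THEMES = [
--     (7, "Personal growth and stepping outside comfort zones"),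
--     (8, "Embracing discomfort for success"),
--     (9, "Overcoming failure and setbacks"),
-- ]
--
--
-- def _extract_themes_from_content(text):
--     tags = {tag for i in range(len(text))
--             for kw, tag in KEYWORD_TAGS if text.startswith(kw, i)}
--     cat = min((t for t in tags if t < 7), default=None)
--     if cat is None:
--         return ["Extended discussion or presentation" if len(text) > 100
--                 else "Brief communication or announcement"]
--     if cat == 0:
--         return [theme for tag, theme in EXTRA_THEMES if tag in tags] + \
--                ["Success mindset and achievement strategies"]
--     return list(CATEGORY_THEMES[cat])
-- ===== Notes on version B (the rewrite author's own statement) =====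
-- stated objective: alternative
-- what changed: Replaces the elif ladder of per-keyword substring tests with a single position sweep over the text that collects every keyword hit as a priority tag into a set, then picks the theme category as the minimum tag; the business extras become a membership filter over the same tag set.
import Mathlib
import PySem

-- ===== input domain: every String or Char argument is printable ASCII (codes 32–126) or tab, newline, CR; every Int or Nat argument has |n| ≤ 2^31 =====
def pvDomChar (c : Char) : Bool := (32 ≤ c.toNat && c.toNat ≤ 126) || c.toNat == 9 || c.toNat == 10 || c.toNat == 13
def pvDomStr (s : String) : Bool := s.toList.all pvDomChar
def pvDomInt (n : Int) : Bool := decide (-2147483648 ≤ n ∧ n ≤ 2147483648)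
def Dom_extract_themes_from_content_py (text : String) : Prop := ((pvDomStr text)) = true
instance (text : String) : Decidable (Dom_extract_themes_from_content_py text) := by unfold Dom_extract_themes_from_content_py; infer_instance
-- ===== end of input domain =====

-- B replaces A's elif ladder with one sweep over text positions collecting all keyword
-- hits as priority tags, then min-tag selection (alternative algorithm, same cost).

-- ===== PORT A =====
def extract_themes_from_content_py (text : String) : List String :=
  let themes : List String := []
  let themes :=
    if ["success", "business", "achievement", "goal"].any (fun word => PySem.Str.isIn word text) then
      let themes := if PySem.Str.isIn "comfort zone" text then themes ++ ["Personal growth and stepping outside comfort zones"] else themes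
      let themes := if PySem.Str.isIn "uncomfortable" text then themes ++ ["Embracing discomfort for success"] else themes
      let themes := if PySem.Str.isIn "fail" text then themes ++ ["Overcoming failure and setbacks"] else themes
      themes ++ ["Success mindset and achievement strategies"]
    else if ["learn", "study", "education", "knowledge"].any (fun word => PySem.Str.isIn word text) then
      themes ++ ["Learning and knowledge acquisition"] ++ ["Educational content and skill development"]
    else if ["technology", "software", "computer", "digital"].any (fun word => PySem.Str.isIn word text) then
      themes ++ ["Technology and digital innovation"] ++ ["Technical education and development"]
    else if ["health", "fitness", "exercise", "workout"].any (fun word => PySem.Str.isIn word text) then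
      themes ++ ["Health and wellness"] ++ ["Physical fitness and lifestyle"]
    else if ["music", "song", "entertainment", "fun"].any (fun word => PySem.Str.isIn word text) then
      themes ++ ["Entertainment and leisure content"] ++ ["Creative and artistic expression"]
    else if ["news", "report", "information", "update"].any (fun word => PySem.Str.isIn word text) then
      themes ++ ["News and current events"] ++ ["Information and updates"]
    else if ["thank", "hello", "welcome", "goodbye"].any (fun word => PySem.Str.isIn word text) then
      themes ++ ["Personal communication and interaction"] ++ ["Social content and engagement"]
    else themes
  let themes :=
    if themes = [] then
      if PySem.Str.len text > 100 then themes ++ ["Extended discussion or presentation"]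
      else themes ++ ["Brief communication or announcement"]
    else themes
  themes

-- ===== PORT B =====
def pvKeywordTags : List (String × Int) :=
  [("success", 0), ("business", 0), ("achievement", 0), ("goal", 0),
   ("learn", 1), ("study", 1), ("education", 1), ("knowledge", 1),
   ("technology", 2), ("software", 2), ("computer", 2), ("digital", 2),
   ("health", 3), ("fitness", 3), ("exercise", 3), ("workout", 3),
   ("music", 4), ("song", 4), ("entertainment", 4), ("fun", 4),
   ("news", 5), ("report", 5), ("information", 5), ("update", 5),
   ("thank", 6), ("hello", 6), ("welcome", 6), ("goodbye", 6),
   ("comfort zone", 7), ("uncomfortable", 8), ("fail", 9)]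

def pvCategoryThemes : PySem.Dict Int (List String) := PySem.Dict.ofList
  [(1, ["Learning and knowledge acquisition", "Educational content and skill development"]),
   (2, ["Technology and digital innovation", "Technical education and development"]),
   (3, ["Health and wellness", "Physical fitness and lifestyle"]),
   (4, ["Entertainment and leisure content", "Creative and artistic expression"]),
   (5, ["News and current events", "Information and updates"]),
   (6, ["Personal communication and interaction", "Social content and engagement"])]

def pvExtraThemes : List (Int × String) :=
  [(7, "Personal growth and stepping outside comfort zones"),
   (8, "Embracing discomfort for success"),
   (9, "Overcoming failure and setbacks")]

-- text.startswith(kw, i) with 0 ≤ i is exactly: kw is a prefix of text[i:]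
def extract_themes_from_content_py_alt (text : String) : List String :=
  let tags : PySem.Set Int := PySem.Set.ofList
    ((PySem.List.pyRange 0 (PySem.Str.len text) 1).flatMap (fun i =>
      (pvKeywordTags.filter (fun p =>
        PySem.Chars.startswith (text.toList.drop i.toNat) p.1.toList)).map (·.2)))
  match PySem.List.min? (tags.filter (fun t => t < 7)) (fun t => t) with
  | none =>
      [if PySem.Str.len text > 100 then "Extended discussion or presentation"
       else "Brief communication or announcement"]
  | some cat =>
      if cat = 0 then
        (pvExtraThemes.filter (fun p => PySem.Set.contains tags p.1)).map (·.2)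
          ++ ["Success mindset and achievement strategies"]
      else PySem.Dict.getD pvCategoryThemes cat []  -- key cat ∈ 1..6 is always present

-- ===== PRECONDITION & SPEC =====
def Spec_extract_themes_from_content_py (text : String) (out : List String) : Prop := out = extract_themes_from_content_py_alt text
instance (text : String) (out : List String) : Decidable (Spec_extract_themes_from_content_py text out) := by unfold Spec_extract_themes_from_content_py; infer_instance

-- ===== CLAIM (what is proved, stated in full; the proofs are below) =====
def Claim_equal_extract_themes_from_content_py : Prop := ∀ (text : String), Dom_extract_themes_from_content_py text → Spec_extract_themes_from_content_py text (extract_themes_from_content_py text)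

-- ===== LEMMAS AND PROOFS =====

-- the list B builds its tag set from
def pvTagList (text : String) : List Int :=
  (PySem.List.pyRange 0 (PySem.Str.len text) 1).flatMap (fun i =>
    (pvKeywordTags.filter (fun p =>
      PySem.Chars.startswith (text.toList.drop i.toNat) p.1.toList)).map (·.2))

-- a nonempty keyword is hit at some sweep position iff it is a substring
lemma pv_hit_iff (text kw : String) (hkw : kw.toList ≠ []) :
    (∃ i, i ∈ PySem.List.pyRange 0 (PySem.Str.len text) 1 ∧
       PySem.Chars.startswith (text.toList.drop i.toNat) kw.toList = true) ↔
    PySem.Str.isIn kw text = true := by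
  have hstart : ∀ s : List Char, PySem.Chars.startswith s kw.toList = kw.toList.isPrefixOf s :=
    fun _ => rfl
  rw [show PySem.Str.isIn kw text = PySem.Chars.isIn kw.toList text.toList from rfl,
      ← PySem.Chars.exists_prefix_drop_iff_isIn]
  constructor
  · rintro ⟨i, hi, hs⟩
    exact ⟨i.toNat, List.isPrefixOf_iff_prefix.mp ((hstart _) ▸ hs)⟩
  · rintro ⟨j, hj⟩
    have hjlt : j < text.toList.length := by
      by_contra h
      have : text.toList.drop j = [] := List.drop_eq_nil_of_le (by omega)
      rw [this] at hj
      exact hkw (List.prefix_nil.mp hj)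
    refine ⟨(j : Int), ?_, ?_⟩
    · rw [PySem.List.mem_pyRange_one]
      have : PySem.Str.len text = (text.toList.length : Int) := by
        simp [pysem]
      omega
    · rw [hstart]
      simpa using List.isPrefixOf_iff_prefix.mpr hj

-- membership in the tag list, generically over the keyword table
lemma pv_mem_tagList (text : String) (t : Int) :
    t ∈ pvTagList text ↔
      ∃ p ∈ pvKeywordTags, p.2 = t ∧ PySem.Str.isIn p.1 text = true := by
  unfold pvTagList
  simp only [List.mem_flatMap, List.mem_map, List.mem_filter]
  constructor
  · rintro ⟨i, hi, p, ⟨hp, hs⟩, ht⟩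
    have hkw : p.1.toList ≠ [] := by
      fin_cases hp <;> simp
    exact ⟨p, hp, ht, (pv_hit_iff text p.1 hkw).mp ⟨i, hi, hs⟩⟩
  · rintro ⟨p, hp, ht, hin⟩
    have hkw : p.1.toList ≠ [] := by
      fin_cases hp <;> simp
    obtain ⟨i, hi, hs⟩ := (pv_hit_iff text p.1 hkw).mpr hin
    exact ⟨i, hi, p, ⟨hp, hs⟩, ht⟩

-- clean characterization: the tag set holds exactly the tags of matching keywords
lemma pv_mem_tags (text : String) (t : Int) :
    t ∈ pvTagList text ↔
      ((t = 0 ∧ (PySem.Str.isIn "success" text = true ∨ PySem.Str.isIn "business" text = true ∨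
                 PySem.Str.isIn "achievement" text = true ∨ PySem.Str.isIn "goal" text = true)) ∨
       (t = 1 ∧ (PySem.Str.isIn "learn" text = true ∨ PySem.Str.isIn "study" text = true ∨
                 PySem.Str.isIn "education" text = true ∨ PySem.Str.isIn "knowledge" text = true)) ∨
       (t = 2 ∧ (PySem.Str.isIn "technology" text = true ∨ PySem.Str.isIn "software" text = true ∨
                 PySem.Str.isIn "computer" text = true ∨ PySem.Str.isIn "digital" text = true)) ∨
       (t = 3 ∧ (PySem.Str.isIn "health" text = true ∨ PySem.Str.isIn "fitness" text = true ∨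
                 PySem.Str.isIn "exercise" text = true ∨ PySem.Str.isIn "workout" text = true)) ∨
       (t = 4 ∧ (PySem.Str.isIn "music" text = true ∨ PySem.Str.isIn "song" text = true ∨
                 PySem.Str.isIn "entertainment" text = true ∨ PySem.Str.isIn "fun" text = true)) ∨
       (t = 5 ∧ (PySem.Str.isIn "news" text = true ∨ PySem.Str.isIn "report" text = true ∨
                 PySem.Str.isIn "information" text = true ∨ PySem.Str.isIn "update" text = true)) ∨
       (t = 6 ∧ (PySem.Str.isIn "thank" text = true ∨ PySem.Str.isIn "hello" text = true ∨
                 PySem.Str.isIn "welcome" text = true ∨ PySem.Str.isIn "goodbye" text = true)) ∨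
       (t = 7 ∧ PySem.Str.isIn "comfort zone" text = true) ∨
       (t = 8 ∧ PySem.Str.isIn "uncomfortable" text = true) ∨
       (t = 9 ∧ PySem.Str.isIn "fail" text = true)) := by
  rw [pv_mem_tagList]
  simp only [pvKeywordTags, List.mem_cons, List.not_mem_nil, or_false]
  constructor
  · rintro ⟨p, hp, ht, hin⟩
    rcases hp with h|h|h|h|h|h|h|h|h|h|h|h|h|h|h|h|h|h|h|h|h|h|h|h|h|h|h|h|h|h|h <;> subst h
    exacts [Or.inl (⟨ht.symm, Or.inl (hin)⟩),
      Or.inl (⟨ht.symm, Or.inr (Or.inl (hin))⟩),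
      Or.inl (⟨ht.symm, Or.inr (Or.inr (Or.inl (hin)))⟩),
      Or.inl (⟨ht.symm, Or.inr (Or.inr (Or.inr (hin)))⟩),
      Or.inr (Or.inl (⟨ht.symm, Or.inl (hin)⟩)),
      Or.inr (Or.inl (⟨ht.symm, Or.inr (Or.inl (hin))⟩)),
      Or.inr (Or.inl (⟨ht.symm, Or.inr (Or.inr (Or.inl (hin)))⟩)),
      Or.inr (Or.inl (⟨ht.symm, Or.inr (Or.inr (Or.inr (hin)))⟩)),
      Or.inr (Or.inr (Or.inl (⟨ht.symm, Or.inl (hin)⟩))),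
      Or.inr (Or.inr (Or.inl (⟨ht.symm, Or.inr (Or.inl (hin))⟩))),
      Or.inr (Or.inr (Or.inl (⟨ht.symm, Or.inr (Or.inr (Or.inl (hin)))⟩))),
      Or.inr (Or.inr (Or.inl (⟨ht.symm, Or.inr (Or.inr (Or.inr (hin)))⟩))),
      Or.inr (Or.inr (Or.inr (Or.inl (⟨ht.symm, Or.inl (hin)⟩)))),
      Or.inr (Or.inr (Or.inr (Or.inl (⟨ht.symm, Or.inr (Or.inl (hin))⟩)))),
      Or.inr (Or.inr (Or.inr (Or.inl (⟨ht.symm, Or.inr (Or.inr (Or.inl (hin)))⟩)))),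
      Or.inr (Or.inr (Or.inr (Or.inl (⟨ht.symm, Or.inr (Or.inr (Or.inr (hin)))⟩)))),
      Or.inr (Or.inr (Or.inr (Or.inr (Or.inl (⟨ht.symm, Or.inl (hin)⟩))))),
      Or.inr (Or.inr (Or.inr (Or.inr (Or.inl (⟨ht.symm, Or.inr (Or.inl (hin))⟩))))),
      Or.inr (Or.inr (Or.inr (Or.inr (Or.inl (⟨ht.symm, Or.inr (Or.inr (Or.inl (hin)))⟩))))),
      Or.inr (Or.inr (Or.inr (Or.inr (Or.inl (⟨ht.symm, Or.inr (Or.inr (Or.inr (hin)))⟩))))),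
      Or.inr (Or.inr (Or.inr (Or.inr (Or.inr (Or.inl (⟨ht.symm, Or.inl (hin)⟩)))))),
      Or.inr (Or.inr (Or.inr (Or.inr (Or.inr (Or.inl (⟨ht.symm, Or.inr (Or.inl (hin))⟩)))))),
      Or.inr (Or.inr (Or.inr (Or.inr (Or.inr (Or.inl (⟨ht.symm, Or.inr (Or.inr (Or.inl (hin)))⟩)))))),
      Or.inr (Or.inr (Or.inr (Or.inr (Or.inr (Or.inl (⟨ht.symm, Or.inr (Or.inr (Or.inr (hin)))⟩)))))),
      Or.inr (Or.inr (Or.inr (Or.inr (Or.inr (Or.inr (Or.inl (⟨ht.symm, Or.inl (hin)⟩))))))),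
      Or.inr (Or.inr (Or.inr (Or.inr (Or.inr (Or.inr (Or.inl (⟨ht.symm, Or.inr (Or.inl (hin))⟩))))))),
      Or.inr (Or.inr (Or.inr (Or.inr (Or.inr (Or.inr (Or.inl (⟨ht.symm, Or.inr (Or.inr (Or.inl (hin)))⟩))))))),
      Or.inr (Or.inr (Or.inr (Or.inr (Or.inr (Or.inr (Or.inl (⟨ht.symm, Or.inr (Or.inr (Or.inr (hin)))⟩))))))),
      Or.inr (Or.inr (Or.inr (Or.inr (Or.inr (Or.inr (Or.inr (Or.inl (⟨ht.symm, hin⟩)))))))),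
      Or.inr (Or.inr (Or.inr (Or.inr (Or.inr (Or.inr (Or.inr (Or.inr (Or.inl (⟨ht.symm, hin⟩))))))))),
      Or.inr (Or.inr (Or.inr (Or.inr (Or.inr (Or.inr (Or.inr (Or.inr (Or.inr (⟨ht.symm, hin⟩)))))))))]
  · intro h
    rcases h with ⟨ht,h|h|h|h⟩|⟨ht,h|h|h|h⟩|⟨ht,h|h|h|h⟩|⟨ht,h|h|h|h⟩|⟨ht,h|h|h|h⟩|⟨ht,h|h|h|h⟩|⟨ht,h|h|h|h⟩|⟨ht,h⟩|⟨ht,h⟩|⟨ht,h⟩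
    exacts [⟨("success", 0), Or.inl (rfl), ht.symm, h⟩,
      ⟨("business", 0), Or.inr (Or.inl (rfl)), ht.symm, h⟩,
      ⟨("achievement", 0), Or.inr (Or.inr (Or.inl (rfl))), ht.symm, h⟩,
      ⟨("goal", 0), Or.inr (Or.inr (Or.inr (Or.inl (rfl)))), ht.symm, h⟩,
      ⟨("learn", 1), Or.inr (Or.inr (Or.inr (Or.inr (Or.inl (rfl))))), ht.symm, h⟩,
      ⟨("study", 1), Or.inr (Or.inr (Or.inr (Or.inr (Or.inr (Or.inl (rfl)))))), ht.symm, h⟩,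
      ⟨("education", 1), Or.inr (Or.inr (Or.inr (Or.inr (Or.inr (Or.inr (Or.inl (rfl))))))), ht.symm, h⟩,
      ⟨("knowledge", 1), Or.inr (Or.inr (Or.inr (Or.inr (Or.inr (Or.inr (Or.inr (Or.inl (rfl)))))))), ht.symm, h⟩,
      ⟨("technology", 2), Or.inr (Or.inr (Or.inr (Or.inr (Or.inr (Or.inr (Or.inr (Or.inr (Or.inl (rfl))))))))), ht.symm, h⟩,
      ⟨("software", 2), Or.inr (Or.inr (Or.inr (Or.inr (Or.inr (Or.inr (Or.inr (Or.inr (Or.inr (Or.inl (rfl)))))))))), ht.symm, h⟩,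
      ⟨("computer", 2), Or.inr (Or.inr (Or.inr (Or.inr (Or.inr (Or.inr (Or.inr (Or.inr (Or.inr (Or.inr (Or.inl (rfl))))))))))), ht.symm, h⟩,
      ⟨("digital", 2), Or.inr (Or.inr (Or.inr (Or.inr (Or.inr (Or.inr (Or.inr (Or.inr (Or.inr (Or.inr (Or.inr (Or.inl (rfl)))))))))))), ht.symm, h⟩,
      ⟨("health", 3), Or.inr (Or.inr (Or.inr (Or.inr (Or.inr (Or.inr (Or.inr (Or.inr (Or.inr (Or.inr (Or.inr (Or.inr (Or.inl (rfl))))))))))))), ht.symm, h⟩,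
      ⟨("fitness", 3), Or.inr (Or.inr (Or.inr (Or.inr (Or.inr (Or.inr (Or.inr (Or.inr (Or.inr (Or.inr (Or.inr (Or.inr (Or.inr (Or.inl (rfl)))))))))))))), ht.symm, h⟩,
      ⟨("exercise", 3), Or.inr (Or.inr (Or.inr (Or.inr (Or.inr (Or.inr (Or.inr (Or.inr (Or.inr (Or.inr (Or.inr (Or.inr (Or.inr (Or.inr (Or.inl (rfl))))))))))))))), ht.symm, h⟩,
      ⟨("workout", 3), Or.inr (Or.inr (Or.inr (Or.inr (Or.inr (Or.inr (Or.inr (Or.inr (Or.inr (Or.inr (Or.inr (Or.inr (Or.inr (Or.inr (Or.inr (Or.inl (rfl)))))))))))))))), ht.symm, h⟩,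
      ⟨("music", 4), Or.inr (Or.inr (Or.inr (Or.inr (Or.inr (Or.inr (Or.inr (Or.inr (Or.inr (Or.inr (Or.inr (Or.inr (Or.inr (Or.inr (Or.inr (Or.inr (Or.inl (rfl))))))))))))))))), ht.symm, h⟩,
      ⟨("song", 4), Or.inr (Or.inr (Or.inr (Or.inr (Or.inr (Or.inr (Or.inr (Or.inr (Or.inr (Or.inr (Or.inr (Or.inr (Or.inr (Or.inr (Or.inr (Or.inr (Or.inr (Or.inl (rfl)))))))))))))))))), ht.symm, h⟩,
      ⟨("entertainment", 4), Or.inr (Or.inr (Or.inr (Or.inr (Or.inr (Or.inr (Or.inr (Or.inr (Or.inr (Or.inr (Or.inr (Or.inr (Or.inr (Or.inr (Or.inr (Or.inr (Or.inr (Or.inr (Or.inl (rfl))))))))))))))))))), ht.symm, h⟩,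
      ⟨("fun", 4), Or.inr (Or.inr (Or.inr (Or.inr (Or.inr (Or.inr (Or.inr (Or.inr (Or.inr (Or.inr (Or.inr (Or.inr (Or.inr (Or.inr (Or.inr (Or.inr (Or.inr (Or.inr (Or.inr (Or.inl (rfl)))))))))))))))))))), ht.symm, h⟩,
      ⟨("news", 5), Or.inr (Or.inr (Or.inr (Or.inr (Or.inr (Or.inr (Or.inr (Or.inr (Or.inr (Or.inr (Or.inr (Or.inr (Or.inr (Or.inr (Or.inr (Or.inr (Or.inr (Or.inr (Or.inr (Or.inr (Or.inl (rfl))))))))))))))))))))), ht.symm, h⟩,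
      ⟨("report", 5), Or.inr (Or.inr (Or.inr (Or.inr (Or.inr (Or.inr (Or.inr (Or.inr (Or.inr (Or.inr (Or.inr (Or.inr (Or.inr (Or.inr (Or.inr (Or.inr (Or.inr (Or.inr (Or.inr (Or.inr (Or.inr (Or.inl (rfl)))))))))))))))))))))), ht.symm, h⟩,
      ⟨("information", 5), Or.inr (Or.inr (Or.inr (Or.inr (Or.inr (Or.inr (Or.inr (Or.inr (Or.inr (Or.inr (Or.inr (Or.inr (Or.inr (Or.inr (Or.inr (Or.inr (Or.inr (Or.inr (Or.inr (Or.inr (Or.inr (Or.inr (Or.inl (rfl))))))))))))))))))))))), ht.symm, h⟩,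
      ⟨("update", 5), Or.inr (Or.inr (Or.inr (Or.inr (Or.inr (Or.inr (Or.inr (Or.inr (Or.inr (Or.inr (Or.inr (Or.inr (Or.inr (Or.inr (Or.inr (Or.inr (Or.inr (Or.inr (Or.inr (Or.inr (Or.inr (Or.inr (Or.inr (Or.inl (rfl)))))))))))))))))))))))), ht.symm, h⟩,
      ⟨("thank", 6), Or.inr (Or.inr (Or.inr (Or.inr (Or.inr (Or.inr (Or.inr (Or.inr (Or.inr (Or.inr (Or.inr (Or.inr (Or.inr (Or.inr (Or.inr (Or.inr (Or.inr (Or.inr (Or.inr (Or.inr (Or.inr (Or.inr (Or.inr (Or.inr (Or.inl (rfl))))))))))))))))))))))))), ht.symm, h⟩,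
      ⟨("hello", 6), Or.inr (Or.inr (Or.inr (Or.inr (Or.inr (Or.inr (Or.inr (Or.inr (Or.inr (Or.inr (Or.inr (Or.inr (Or.inr (Or.inr (Or.inr (Or.inr (Or.inr (Or.inr (Or.inr (Or.inr (Or.inr (Or.inr (Or.inr (Or.inr (Or.inr (Or.inl (rfl)))))))))))))))))))))))))), ht.symm, h⟩,
      ⟨("welcome", 6), Or.inr (Or.inr (Or.inr (Or.inr (Or.inr (Or.inr (Or.inr (Or.inr (Or.inr (Or.inr (Or.inr (Or.inr (Or.inr (Or.inr (Or.inr (Or.inr (Or.inr (Or.inr (Or.inr (Or.inr (Or.inr (Or.inr (Or.inr (Or.inr (Or.inr (Or.inr (Or.inl (rfl))))))))))))))))))))))))))), ht.symm, h⟩,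
      ⟨("goodbye", 6), Or.inr (Or.inr (Or.inr (Or.inr (Or.inr (Or.inr (Or.inr (Or.inr (Or.inr (Or.inr (Or.inr (Or.inr (Or.inr (Or.inr (Or.inr (Or.inr (Or.inr (Or.inr (Or.inr (Or.inr (Or.inr (Or.inr (Or.inr (Or.inr (Or.inr (Or.inr (Or.inr (Or.inl (rfl)))))))))))))))))))))))))))), ht.symm, h⟩,
      ⟨("comfort zone", 7), Or.inr (Or.inr (Or.inr (Or.inr (Or.inr (Or.inr (Or.inr (Or.inr (Or.inr (Or.inr (Or.inr (Or.inr (Or.inr (Or.inr (Or.inr (Or.inr (Or.inr (Or.inr (Or.inr (Or.inr (Or.inr (Or.inr (Or.inr (Or.inr (Or.inr (Or.inr (Or.inr (Or.inr (Or.inl (rfl))))))))))))))))))))))))))))), ht.symm, h⟩,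
      ⟨("uncomfortable", 8), Or.inr (Or.inr (Or.inr (Or.inr (Or.inr (Or.inr (Or.inr (Or.inr (Or.inr (Or.inr (Or.inr (Or.inr (Or.inr (Or.inr (Or.inr (Or.inr (Or.inr (Or.inr (Or.inr (Or.inr (Or.inr (Or.inr (Or.inr (Or.inr (Or.inr (Or.inr (Or.inr (Or.inr (Or.inr (Or.inl (rfl)))))))))))))))))))))))))))))), ht.symm, h⟩,
      ⟨("fail", 9), Or.inr (Or.inr (Or.inr (Or.inr (Or.inr (Or.inr (Or.inr (Or.inr (Or.inr (Or.inr (Or.inr (Or.inr (Or.inr (Or.inr (Or.inr (Or.inr (Or.inr (Or.inr (Or.inr (Or.inr (Or.inr (Or.inr (Or.inr (Or.inr (Or.inr (Or.inr (Or.inr (Or.inr (Or.inr (Or.inr (rfl)))))))))))))))))))))))))))))), ht.symm, h⟩]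


-- proof-only helpers: names for B's intermediate data
def pvTags (text : String) : PySem.Set Int := PySem.Set.ofList (pvTagList text)

def pvS (text : String) : List Int := (pvTags text).filter (fun t => t < 7)

lemma pvAlt_eq (text : String) :
    extract_themes_from_content_py_alt text =
      (match PySem.List.min? (pvS text) (fun t => t) with
       | none =>
           [if PySem.Str.len text > 100 then "Extended discussion or presentation"
            else "Brief communication or announcement"]
       | some cat =>
           if cat = 0 then
             (pvExtraThemes.filter (fun p => PySem.Set.contains (pvTags text) p.1)).map (·.2)
               ++ ["Success mindset and achievement strategies"]
           else PySem.Dict.getD pvCategoryThemes cat []) := rfl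

lemma pv_contains_mem (text : String) (x : Int) :
    PySem.Set.contains (pvTags text) x = true ↔ x ∈ pvTagList text := by
  simp [pvTags, PySem.Set.contains, PySem.Set.mem_ofList]

lemma pv_mem_S (text : String) (x : Int) :
    x ∈ pvS text ↔ x ∈ pvTagList text ∧ x < 7 := by
  simp [pvS, pvTags, List.mem_filter, PySem.Set.mem_ofList]

lemma pv_contains7 (text : String) :
    PySem.Set.contains (pvTags text) 7 = PySem.Str.isIn "comfort zone" text := by
  cases hx : PySem.Str.isIn "comfort zone" text
  · rw [Bool.eq_false_iff]
    intro hcc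
    rcases (pv_mem_tags text 7).mp ((pv_contains_mem text 7).mp hcc) with
      ⟨h',h''⟩|⟨h',h''⟩|⟨h',h''⟩|⟨h',h''⟩|⟨h',h''⟩|⟨h',h''⟩|⟨h',h''⟩|⟨h',h''⟩|⟨h',h''⟩|⟨h',h''⟩ <;>
      first | omega | simp_all
  · exact (pv_contains_mem text 7).mpr ((pv_mem_tags text 7).mpr (Or.inr (Or.inr (Or.inr (Or.inr (Or.inr (Or.inr (Or.inr (Or.inl (⟨rfl, hx⟩))))))))))

lemma pv_contains8 (text : String) :
    PySem.Set.contains (pvTags text) 8 = PySem.Str.isIn "uncomfortable" text := by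
  cases hx : PySem.Str.isIn "uncomfortable" text
  · rw [Bool.eq_false_iff]
    intro hcc
    rcases (pv_mem_tags text 8).mp ((pv_contains_mem text 8).mp hcc) with
      ⟨h',h''⟩|⟨h',h''⟩|⟨h',h''⟩|⟨h',h''⟩|⟨h',h''⟩|⟨h',h''⟩|⟨h',h''⟩|⟨h',h''⟩|⟨h',h''⟩|⟨h',h''⟩ <;>
      first | omega | simp_all
  · exact (pv_contains_mem text 8).mpr ((pv_mem_tags text 8).mpr (Or.inr (Or.inr (Or.inr (Or.inr (Or.inr (Or.inr (Or.inr (Or.inr (Or.inl (⟨rfl, hx⟩)))))))))))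

lemma pv_contains9 (text : String) :
    PySem.Set.contains (pvTags text) 9 = PySem.Str.isIn "fail" text := by
  cases hx : PySem.Str.isIn "fail" text
  · rw [Bool.eq_false_iff]
    intro hcc
    rcases (pv_mem_tags text 9).mp ((pv_contains_mem text 9).mp hcc) with
      ⟨h',h''⟩|⟨h',h''⟩|⟨h',h''⟩|⟨h',h''⟩|⟨h',h''⟩|⟨h',h''⟩|⟨h',h''⟩|⟨h',h''⟩|⟨h',h''⟩|⟨h',h''⟩ <;>
      first | omega | simp_all
  · exact (pv_contains_mem text 9).mpr ((pv_mem_tags text 9).mpr (Or.inr (Or.inr (Or.inr (Or.inr (Or.inr (Or.inr (Or.inr (Or.inr (Or.inr (⟨rfl, hx⟩)))))))))))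

-- ===== VERDICT (by name: the statement is the Claim_ definition above) =====
set_option maxHeartbeats 3200000 in
theorem extract_themes_from_content_py_spec : Claim_equal_extract_themes_from_content_py := by
  intro text _
  show extract_themes_from_content_py text = extract_themes_from_content_py_alt text
  rw [pvAlt_eq]
  rcases hM : PySem.List.min? (pvS text) (fun t => t) with _ | cat
  · -- no category keyword matched anywhere: default branch on both sides
    have hnil : pvS text = [] := (PySem.List.min?_eq_none_iff _ _).mp hM
    have hb0 : (["success", "business", "achievement", "goal"].any (fun word => PySem.Str.isIn word text)) = false := by
      rw [Bool.eq_false_iff]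
      intro hc
      simp only [List.any_cons, List.any_nil, Bool.or_eq_true, Bool.or_false] at hc
      have hm : ((0 : Int)) ∈ pvS text :=
        (pv_mem_S text 0).mpr ⟨(pv_mem_tags text 0).mpr (Or.inl (⟨rfl, hc⟩)), by norm_num⟩
      rw [hnil] at hm
      simp at hm
    have hb1 : (["learn", "study", "education", "knowledge"].any (fun word => PySem.Str.isIn word text)) = false := by
      rw [Bool.eq_false_iff]
      intro hc
      simp only [List.any_cons, List.any_nil, Bool.or_eq_true, Bool.or_false] at hc
      have hm : ((1 : Int)) ∈ pvS text :=
        (pv_mem_S text 1).mpr ⟨(pv_mem_tags text 1).mpr (Or.inr (Or.inl (⟨rfl, hc⟩))), by norm_num⟩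
      rw [hnil] at hm
      simp at hm
    have hb2 : (["technology", "software", "computer", "digital"].any (fun word => PySem.Str.isIn word text)) = false := by
      rw [Bool.eq_false_iff]
      intro hc
      simp only [List.any_cons, List.any_nil, Bool.or_eq_true, Bool.or_false] at hc
      have hm : ((2 : Int)) ∈ pvS text :=
        (pv_mem_S text 2).mpr ⟨(pv_mem_tags text 2).mpr (Or.inr (Or.inr (Or.inl (⟨rfl, hc⟩)))), by norm_num⟩
      rw [hnil] at hm
      simp at hm
    have hb3 : (["health", "fitness", "exercise", "workout"].any (fun word => PySem.Str.isIn word text)) = false := by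
      rw [Bool.eq_false_iff]
      intro hc
      simp only [List.any_cons, List.any_nil, Bool.or_eq_true, Bool.or_false] at hc
      have hm : ((3 : Int)) ∈ pvS text :=
        (pv_mem_S text 3).mpr ⟨(pv_mem_tags text 3).mpr (Or.inr (Or.inr (Or.inr (Or.inl (⟨rfl, hc⟩))))), by norm_num⟩
      rw [hnil] at hm
      simp at hm
    have hb4 : (["music", "song", "entertainment", "fun"].any (fun word => PySem.Str.isIn word text)) = false := by
      rw [Bool.eq_false_iff]
      intro hc
      simp only [List.any_cons, List.any_nil, Bool.or_eq_true, Bool.or_false] at hc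
      have hm : ((4 : Int)) ∈ pvS text :=
        (pv_mem_S text 4).mpr ⟨(pv_mem_tags text 4).mpr (Or.inr (Or.inr (Or.inr (Or.inr (Or.inl (⟨rfl, hc⟩)))))), by norm_num⟩
      rw [hnil] at hm
      simp at hm
    have hb5 : (["news", "report", "information", "update"].any (fun word => PySem.Str.isIn word text)) = false := by
      rw [Bool.eq_false_iff]
      intro hc
      simp only [List.any_cons, List.any_nil, Bool.or_eq_true, Bool.or_false] at hc
      have hm : ((5 : Int)) ∈ pvS text :=
        (pv_mem_S text 5).mpr ⟨(pv_mem_tags text 5).mpr (Or.inr (Or.inr (Or.inr (Or.inr (Or.inr (Or.inl (⟨rfl, hc⟩))))))), by norm_num⟩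
      rw [hnil] at hm
      simp at hm
    have hb6 : (["thank", "hello", "welcome", "goodbye"].any (fun word => PySem.Str.isIn word text)) = false := by
      rw [Bool.eq_false_iff]
      intro hc
      simp only [List.any_cons, List.any_nil, Bool.or_eq_true, Bool.or_false] at hc
      have hm : ((6 : Int)) ∈ pvS text :=
        (pv_mem_S text 6).mpr ⟨(pv_mem_tags text 6).mpr (Or.inr (Or.inr (Or.inr (Or.inr (Or.inr (Or.inr (Or.inl (⟨rfl, hc⟩)))))))), by norm_num⟩
      rw [hnil] at hm
      simp at hm
    try simp at hb0; try simp at hb1; try simp at hb2; try simp at hb3; try simp at hb4; try simp at hb5; try simp at hb6;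
    simp [extract_themes_from_content_py, hb0, hb1, hb2, hb3, hb4, hb5, hb6]
    try (split_ifs <;> rfl)
  · have hcS : cat ∈ pvS text := PySem.List.min?_mem hM
    have hmin : ∀ y ∈ pvS text, cat ≤ y := fun y hy => PySem.List.min?_isMin hM y hy
    have hcT := (pv_mem_S text cat).mp hcS
    rcases (pv_mem_tags text cat).mp hcT.1 with
      ⟨hc,hd⟩|⟨hc,hd⟩|⟨hc,hd⟩|⟨hc,hd⟩|⟨hc,hd⟩|⟨hc,hd⟩|⟨hc,hd⟩|⟨hc,hd⟩|⟨hc,hd⟩|⟨hc,hd⟩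
    · -- business/success branch
      subst hc
      have hb0 : (["success", "business", "achievement", "goal"].any (fun word => PySem.Str.isIn word text)) = true := by rcases hd with h|h|h|h <;> (try simp at h) <;> simp [h]
      have h7 := pv_contains7 text
      have h8 := pv_contains8 text
      have h9 := pv_contains9 text
      try simp at hb0
      by_cases he7 : PySem.Str.isIn "comfort zone" text = true <;>
        by_cases he8 : PySem.Str.isIn "uncomfortable" text = true <;>
          by_cases he9 : PySem.Str.isIn "fail" text = true <;>
            (try simp at h7 h8 h9 he7 he8 he9) <;>
              simp [extract_themes_from_content_py, hb0, pvExtraThemes, h7, h8, h9, he7, he8, he9]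
    · subst hc
      have hb0 : (["success", "business", "achievement", "goal"].any (fun word => PySem.Str.isIn word text)) = false := by
        rw [Bool.eq_false_iff]
        intro hc
        simp only [List.any_cons, List.any_nil, Bool.or_eq_true, Bool.or_false] at hc
        have hm : ((0 : Int)) ∈ pvS text :=
          (pv_mem_S text 0).mpr ⟨(pv_mem_tags text 0).mpr (Or.inl (⟨rfl, hc⟩)), by norm_num⟩
        have := hmin _ hm
        omega
      have hb1 : (["learn", "study", "education", "knowledge"].any (fun word => PySem.Str.isIn word text)) = true := by rcases hd with h|h|h|h <;> (try simp at h) <;> simp [h]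
      have hD : PySem.Dict.getD pvCategoryThemes 1 [] = ["Learning and knowledge acquisition", "Educational content and skill development"] := rfl
      try simp at hb0; try simp at hb1
      simp [extract_themes_from_content_py, hb0, hb1, hD]
    · subst hc
      have hb0 : (["success", "business", "achievement", "goal"].any (fun word => PySem.Str.isIn word text)) = false := by
        rw [Bool.eq_false_iff]
        intro hc
        simp only [List.any_cons, List.any_nil, Bool.or_eq_true, Bool.or_false] at hc
        have hm : ((0 : Int)) ∈ pvS text :=
          (pv_mem_S text 0).mpr ⟨(pv_mem_tags text 0).mpr (Or.inl (⟨rfl, hc⟩)), by norm_num⟩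
        have := hmin _ hm
        omega
      have hb1 : (["learn", "study", "education", "knowledge"].any (fun word => PySem.Str.isIn word text)) = false := by
        rw [Bool.eq_false_iff]
        intro hc
        simp only [List.any_cons, List.any_nil, Bool.or_eq_true, Bool.or_false] at hc
        have hm : ((1 : Int)) ∈ pvS text :=
          (pv_mem_S text 1).mpr ⟨(pv_mem_tags text 1).mpr (Or.inr (Or.inl (⟨rfl, hc⟩))), by norm_num⟩
        have := hmin _ hm
        omega
      have hb2 : (["technology", "software", "computer", "digital"].any (fun word => PySem.Str.isIn word text)) = true := by rcases hd with h|h|h|h <;> (try simp at h) <;> simp [h]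
      have hD : PySem.Dict.getD pvCategoryThemes 2 [] = ["Technology and digital innovation", "Technical education and development"] := rfl
      try simp at hb0; try simp at hb1; try simp at hb2
      simp [extract_themes_from_content_py, hb0, hb1, hb2, hD]
    · subst hc
      have hb0 : (["success", "business", "achievement", "goal"].any (fun word => PySem.Str.isIn word text)) = false := by
        rw [Bool.eq_false_iff]
        intro hc
        simp only [List.any_cons, List.any_nil, Bool.or_eq_true, Bool.or_false] at hc
        have hm : ((0 : Int)) ∈ pvS text :=
          (pv_mem_S text 0).mpr ⟨(pv_mem_tags text 0).mpr (Or.inl (⟨rfl, hc⟩)), by norm_num⟩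
        have := hmin _ hm
        omega
      have hb1 : (["learn", "study", "education", "knowledge"].any (fun word => PySem.Str.isIn word text)) = false := by
        rw [Bool.eq_false_iff]
        intro hc
        simp only [List.any_cons, List.any_nil, Bool.or_eq_true, Bool.or_false] at hc
        have hm : ((1 : Int)) ∈ pvS text :=
          (pv_mem_S text 1).mpr ⟨(pv_mem_tags text 1).mpr (Or.inr (Or.inl (⟨rfl, hc⟩))), by norm_num⟩
        have := hmin _ hm
        omega
      have hb2 : (["technology", "software", "computer", "digital"].any (fun word => PySem.Str.isIn word text)) = false := by
        rw [Bool.eq_false_iff]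
        intro hc
        simp only [List.any_cons, List.any_nil, Bool.or_eq_true, Bool.or_false] at hc
        have hm : ((2 : Int)) ∈ pvS text :=
          (pv_mem_S text 2).mpr ⟨(pv_mem_tags text 2).mpr (Or.inr (Or.inr (Or.inl (⟨rfl, hc⟩)))), by norm_num⟩
        have := hmin _ hm
        omega
      have hb3 : (["health", "fitness", "exercise", "workout"].any (fun word => PySem.Str.isIn word text)) = true := by rcases hd with h|h|h|h <;> (try simp at h) <;> simp [h]
      have hD : PySem.Dict.getD pvCategoryThemes 3 [] = ["Health and wellness", "Physical fitness and lifestyle"] := rfl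
      try simp at hb0; try simp at hb1; try simp at hb2; try simp at hb3
      simp [extract_themes_from_content_py, hb0, hb1, hb2, hb3, hD]
    · subst hc
      have hb0 : (["success", "business", "achievement", "goal"].any (fun word => PySem.Str.isIn word text)) = false := by
        rw [Bool.eq_false_iff]
        intro hc
        simp only [List.any_cons, List.any_nil, Bool.or_eq_true, Bool.or_false] at hc
        have hm : ((0 : Int)) ∈ pvS text :=
          (pv_mem_S text 0).mpr ⟨(pv_mem_tags text 0).mpr (Or.inl (⟨rfl, hc⟩)), by norm_num⟩
        have := hmin _ hm
        omega
      have hb1 : (["learn", "study", "education", "knowledge"].any (fun word => PySem.Str.isIn word text)) = false := by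
        rw [Bool.eq_false_iff]
        intro hc
        simp only [List.any_cons, List.any_nil, Bool.or_eq_true, Bool.or_false] at hc
        have hm : ((1 : Int)) ∈ pvS text :=
          (pv_mem_S text 1).mpr ⟨(pv_mem_tags text 1).mpr (Or.inr (Or.inl (⟨rfl, hc⟩))), by norm_num⟩
        have := hmin _ hm
        omega
      have hb2 : (["technology", "software", "computer", "digital"].any (fun word => PySem.Str.isIn word text)) = false := by
        rw [Bool.eq_false_iff]
        intro hc
        simp only [List.any_cons, List.any_nil, Bool.or_eq_true, Bool.or_false] at hc
        have hm : ((2 : Int)) ∈ pvS text :=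
          (pv_mem_S text 2).mpr ⟨(pv_mem_tags text 2).mpr (Or.inr (Or.inr (Or.inl (⟨rfl, hc⟩)))), by norm_num⟩
        have := hmin _ hm
        omega
      have hb3 : (["health", "fitness", "exercise", "workout"].any (fun word => PySem.Str.isIn word text)) = false := by
        rw [Bool.eq_false_iff]
        intro hc
        simp only [List.any_cons, List.any_nil, Bool.or_eq_true, Bool.or_false] at hc
        have hm : ((3 : Int)) ∈ pvS text :=
          (pv_mem_S text 3).mpr ⟨(pv_mem_tags text 3).mpr (Or.inr (Or.inr (Or.inr (Or.inl (⟨rfl, hc⟩))))), by norm_num⟩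
        have := hmin _ hm
        omega
      have hb4 : (["music", "song", "entertainment", "fun"].any (fun word => PySem.Str.isIn word text)) = true := by rcases hd with h|h|h|h <;> (try simp at h) <;> simp [h]
      have hD : PySem.Dict.getD pvCategoryThemes 4 [] = ["Entertainment and leisure content", "Creative and artistic expression"] := rfl
      try simp at hb0; try simp at hb1; try simp at hb2; try simp at hb3; try simp at hb4
      simp [extract_themes_from_content_py, hb0, hb1, hb2, hb3, hb4, hD]
    · subst hc
      have hb0 : (["success", "business", "achievement", "goal"].any (fun word => PySem.Str.isIn word text)) = false := by
        rw [Bool.eq_false_iff]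
        intro hc
        simp only [List.any_cons, List.any_nil, Bool.or_eq_true, Bool.or_false] at hc
        have hm : ((0 : Int)) ∈ pvS text :=
          (pv_mem_S text 0).mpr ⟨(pv_mem_tags text 0).mpr (Or.inl (⟨rfl, hc⟩)), by norm_num⟩
        have := hmin _ hm
        omega
      have hb1 : (["learn", "study", "education", "knowledge"].any (fun word => PySem.Str.isIn word text)) = false := by
        rw [Bool.eq_false_iff]
        intro hc
        simp only [List.any_cons, List.any_nil, Bool.or_eq_true, Bool.or_false] at hc
        have hm : ((1 : Int)) ∈ pvS text :=
          (pv_mem_S text 1).mpr ⟨(pv_mem_tags text 1).mpr (Or.inr (Or.inl (⟨rfl, hc⟩))), by norm_num⟩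
        have := hmin _ hm
        omega
      have hb2 : (["technology", "software", "computer", "digital"].any (fun word => PySem.Str.isIn word text)) = false := by
        rw [Bool.eq_false_iff]
        intro hc
        simp only [List.any_cons, List.any_nil, Bool.or_eq_true, Bool.or_false] at hc
        have hm : ((2 : Int)) ∈ pvS text :=
          (pv_mem_S text 2).mpr ⟨(pv_mem_tags text 2).mpr (Or.inr (Or.inr (Or.inl (⟨rfl, hc⟩)))), by norm_num⟩
        have := hmin _ hm
        omega
      have hb3 : (["health", "fitness", "exercise", "workout"].any (fun word => PySem.Str.isIn word text)) = false := by
        rw [Bool.eq_false_iff]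
        intro hc
        simp only [List.any_cons, List.any_nil, Bool.or_eq_true, Bool.or_false] at hc
        have hm : ((3 : Int)) ∈ pvS text :=
          (pv_mem_S text 3).mpr ⟨(pv_mem_tags text 3).mpr (Or.inr (Or.inr (Or.inr (Or.inl (⟨rfl, hc⟩))))), by norm_num⟩
        have := hmin _ hm
        omega
      have hb4 : (["music", "song", "entertainment", "fun"].any (fun word => PySem.Str.isIn word text)) = false := by
        rw [Bool.eq_false_iff]
        intro hc
        simp only [List.any_cons, List.any_nil, Bool.or_eq_true, Bool.or_false] at hc
        have hm : ((4 : Int)) ∈ pvS text :=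
          (pv_mem_S text 4).mpr ⟨(pv_mem_tags text 4).mpr (Or.inr (Or.inr (Or.inr (Or.inr (Or.inl (⟨rfl, hc⟩)))))), by norm_num⟩
        have := hmin _ hm
        omega
      have hb5 : (["news", "report", "information", "update"].any (fun word => PySem.Str.isIn word text)) = true := by rcases hd with h|h|h|h <;> (try simp at h) <;> simp [h]
      have hD : PySem.Dict.getD pvCategoryThemes 5 [] = ["News and current events", "Information and updates"] := rfl
      try simp at hb0; try simp at hb1; try simp at hb2; try simp at hb3; try simp at hb4; try simp at hb5
      simp [extract_themes_from_content_py, hb0, hb1, hb2, hb3, hb4, hb5, hD]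
    · subst hc
      have hb0 : (["success", "business", "achievement", "goal"].any (fun word => PySem.Str.isIn word text)) = false := by
        rw [Bool.eq_false_iff]
        intro hc
        simp only [List.any_cons, List.any_nil, Bool.or_eq_true, Bool.or_false] at hc
        have hm : ((0 : Int)) ∈ pvS text :=
          (pv_mem_S text 0).mpr ⟨(pv_mem_tags text 0).mpr (Or.inl (⟨rfl, hc⟩)), by norm_num⟩
        have := hmin _ hm
        omega
      have hb1 : (["learn", "study", "education", "knowledge"].any (fun word => PySem.Str.isIn word text)) = false := by
        rw [Bool.eq_false_iff]
        intro hc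
        simp only [List.any_cons, List.any_nil, Bool.or_eq_true, Bool.or_false] at hc
        have hm : ((1 : Int)) ∈ pvS text :=
          (pv_mem_S text 1).mpr ⟨(pv_mem_tags text 1).mpr (Or.inr (Or.inl (⟨rfl, hc⟩))), by norm_num⟩
        have := hmin _ hm
        omega
      have hb2 : (["technology", "software", "computer", "digital"].any (fun word => PySem.Str.isIn word text)) = false := by
        rw [Bool.eq_false_iff]
        intro hc
        simp only [List.any_cons, List.any_nil, Bool.or_eq_true, Bool.or_false] at hc
        have hm : ((2 : Int)) ∈ pvS text :=
          (pv_mem_S text 2).mpr ⟨(pv_mem_tags text 2).mpr (Or.inr (Or.inr (Or.inl (⟨rfl, hc⟩)))), by norm_num⟩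
        have := hmin _ hm
        omega
      have hb3 : (["health", "fitness", "exercise", "workout"].any (fun word => PySem.Str.isIn word text)) = false := by
        rw [Bool.eq_false_iff]
        intro hc
        simp only [List.any_cons, List.any_nil, Bool.or_eq_true, Bool.or_false] at hc
        have hm : ((3 : Int)) ∈ pvS text :=
          (pv_mem_S text 3).mpr ⟨(pv_mem_tags text 3).mpr (Or.inr (Or.inr (Or.inr (Or.inl (⟨rfl, hc⟩))))), by norm_num⟩
        have := hmin _ hm
        omega
      have hb4 : (["music", "song", "entertainment", "fun"].any (fun word => PySem.Str.isIn word text)) = false := by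
        rw [Bool.eq_false_iff]
        intro hc
        simp only [List.any_cons, List.any_nil, Bool.or_eq_true, Bool.or_false] at hc
        have hm : ((4 : Int)) ∈ pvS text :=
          (pv_mem_S text 4).mpr ⟨(pv_mem_tags text 4).mpr (Or.inr (Or.inr (Or.inr (Or.inr (Or.inl (⟨rfl, hc⟩)))))), by norm_num⟩
        have := hmin _ hm
        omega
      have hb5 : (["news", "report", "information", "update"].any (fun word => PySem.Str.isIn word text)) = false := by
        rw [Bool.eq_false_iff]
        intro hc
        simp only [List.any_cons, List.any_nil, Bool.or_eq_true, Bool.or_false] at hc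
        have hm : ((5 : Int)) ∈ pvS text :=
          (pv_mem_S text 5).mpr ⟨(pv_mem_tags text 5).mpr (Or.inr (Or.inr (Or.inr (Or.inr (Or.inr (Or.inl (⟨rfl, hc⟩))))))), by norm_num⟩
        have := hmin _ hm
        omega
      have hb6 : (["thank", "hello", "welcome", "goodbye"].any (fun word => PySem.Str.isIn word text)) = true := by rcases hd with h|h|h|h <;> (try simp at h) <;> simp [h]
      have hD : PySem.Dict.getD pvCategoryThemes 6 [] = ["Personal communication and interaction", "Social content and engagement"] := rfl
      try simp at hb0; try simp at hb1; try simp at hb2; try simp at hb3; try simp at hb4; try simp at hb5; try simp at hb6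
      simp [extract_themes_from_content_py, hb0, hb1, hb2, hb3, hb4, hb5, hb6, hD]
    · exact absurd hcT.2 (by omega)
    · exact absurd hcT.2 (by omega)
    · exact absurd hcT.2 (by omega)
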